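-- pv_equiv track=rewrite | github.com/MerciaReginasl/terceiro_estagio | pico.py | verifica_pico
-- ===== SOURCE A (Python) =====
-- def verifica_pico(lista):
--     if len(lista) < 3:
--         return False
--
--     crescente = False
--     decrescente = False
--
--     for i in range(1, len(lista)):
--         if lista[i] > lista[i-1]:
--             crescente = True
--         elif lista[i] < lista[i-1]:
--             decrescente = True
--
--         if crescente and decrescente:
--             return True
--
--     return False
-- ===== SOURCE B (Python) =====
-- def verifica_pico(lista):
--     if len(lista) < 3:
--         return False
--     pairs = list(zip(lista, lista[1:]))
--     return any(b > a for a, b in pairs) and any(b < a for a, b in pairs)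
-- ===== Notes on version B (the rewrite author's own statement) =====
-- stated objective: simpler
-- what changed: Replaced the single flag-accumulating early-exit loop with two independent existence scans over the adjacent pairs (any up-step AND any down-step).
import Mathlib
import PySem

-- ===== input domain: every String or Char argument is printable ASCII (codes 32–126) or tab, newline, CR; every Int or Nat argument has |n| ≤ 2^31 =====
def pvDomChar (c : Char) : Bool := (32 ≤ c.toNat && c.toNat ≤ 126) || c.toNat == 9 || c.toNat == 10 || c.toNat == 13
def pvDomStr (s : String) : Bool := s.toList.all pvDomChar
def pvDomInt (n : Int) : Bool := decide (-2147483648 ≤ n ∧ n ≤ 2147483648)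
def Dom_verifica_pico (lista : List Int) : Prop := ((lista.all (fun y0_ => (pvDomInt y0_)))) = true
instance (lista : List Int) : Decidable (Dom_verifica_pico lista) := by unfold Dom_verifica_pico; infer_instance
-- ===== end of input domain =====

-- B replaces A's flag-accumulating early-exit loop with two independent existence scans (simpler decomposition).

-- ===== PORT A =====
-- A's loop over i in range(1, len), kept as recursion over (previous element, rest), with the two flags and the early return.
def pvALoop (prev : Int) (rest : List Int) (crescente decrescente : Bool) : Bool :=
  match rest with
  | [] => false
  | x :: xs =>
    let crescente := if x > prev then true else crescente
    let decrescente := if x > prev then decrescente else if x < prev then true else decrescente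
    if crescente && decrescente then true else pvALoop x xs crescente decrescente

def verifica_pico (lista : List Int) : Bool :=
  if lista.length < 3 then false
  else
    match lista with
    | [] => false
    | h :: t => pvALoop h t false false

-- ===== PORT B =====
def verifica_pico_alt (lista : List Int) : Bool :=
  if lista.length < 3 then false
  else
    let pairs := lista.zip lista.tail
    (pairs.any (fun p => p.2 > p.1)) && (pairs.any (fun p => p.2 < p.1))

-- ===== PRECONDITION & SPEC =====
def Spec_verifica_pico (lista : List Int) (out : Bool) : Prop := out = verifica_pico_alt lista
instance (lista : List Int) (out : Bool) : Decidable (Spec_verifica_pico lista out) := by unfold Spec_verifica_pico; infer_instance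

-- ===== CLAIM (what is proved, stated in full; the proofs are below) =====
def Claim_equal_verifica_pico : Prop := ∀ (lista : List Int), Dom_verifica_pico lista → Spec_verifica_pico lista (verifica_pico lista)

-- ===== LEMMAS AND PROOFS =====
theorem pvALoop_eq (rest : List Int) : ∀ (prev : Int) (c d : Bool), (c && d) = false →
    pvALoop prev rest c d =
      ((c || ((prev :: rest).zip rest).any (fun p => p.2 > p.1)) &&
       (d || ((prev :: rest).zip rest).any (fun p => p.2 < p.1))) := by
  induction rest with
  | nil =>
    intro prev c d h
    simp [pvALoop, h]
  | cons x xs ih =>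
    intro prev c d h
    by_cases hup : prev < x
    · by_cases hd : d = true
      · have hc : c = false := by cases c <;> simp_all
        simp [pvALoop, hup, hd, hc, show ¬ x < prev by omega]
      · have hd' : d = false := by cases d <;> simp_all
        rw [pvALoop]
        simp only [hup, if_true]
        simp only [hd', Bool.and_false]
        rw [ih x true false (by simp)]
        simp [hup, show ¬ x < prev by omega]
    · by_cases hdn : x < prev
      · by_cases hc : c = true
        · simp [pvALoop, show ¬ (x > prev) from hup, hdn, hc]
        · have hc' : c = false := by cases c <;> simp_all
          rw [pvALoop]
          simp only [show (x > prev) = (prev < x) from rfl, hup, if_false, hdn, if_true]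
          simp only [hc', Bool.false_and]
          rw [ih x false true (by simp)]
          simp [hup, hdn]
      · rw [pvALoop]
        simp only [show (x > prev) = (prev < x) from rfl, hup, if_false, hdn]
        rw [if_neg (by simp [h]), ih x c d h]
        simp [hup, hdn]

-- ===== VERDICT (by name: the statement is the Claim_ definition above) =====
theorem verifica_pico_spec : Claim_equal_verifica_pico := by
  intro lista _
  unfold Spec_verifica_pico verifica_pico verifica_pico_alt
  by_cases hlen : lista.length < 3
  · simp [hlen]
  · simp only [hlen, if_false]
    match lista with
    | [] => simp at hlen
    | h :: t =>
      show pvALoop h t false false = _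
      rw [pvALoop_eq t h false false (by simp)]
      simp [List.tail]
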